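-- pv_equiv track=rewrite | github.com/JoungheeKim/uda_pytorch | src/back_translation.py | split_sent_by_punc
-- ===== SOURCE A (Python) =====
-- def split_sent_by_punc(sent, punc_list, max_len):
--     """
--     Adapted from UDA official code
--     https://github.com/google-research/uda/blob/master/back_translate/split_paragraphs.py
--     """
--
--     if len(punc_list) == 0 or len(sent) <= max_len:
--         return [sent]
--
--     punc = punc_list[0]
--     if punc == " " or not punc:
--         offset = 100
--     else:
--         offset = 5
--
--     sent_list = []
--     start = 0
--     while start < len(sent):
--         if punc:
--             pos = sent.find(punc, start + offset)
--         else: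
--             pos = start + offset
--         if pos != -1:
--             sent_list += [sent[start: pos + 1]]
--             start = pos + 1
--         else:
--             sent_list += [sent[start:]]
--             break
--
--     new_sent_list = []
--     for temp_sent in sent_list:
--         new_sent_list += split_sent_by_punc(temp_sent, punc_list[1:], max_len)
--
--     return new_sent_list
-- ===== SOURCE B (Python) =====
-- def _chunks(s, punc):
--     """Cut one over-long piece: first collect the cut boundaries, then slice.
--     Boundaries are chosen greedily from the list of all occurrence positions
--     of punc: take the first occurrence at least `offset` past the previous cut."""
--     if not punc:
--         step = 101  # offset 100, chunk length offset + 1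
--         return [s[i:i + step] for i in range(0, len(s), step)]
--     offset = 100 if punc == " " else 5
--     occ = [i for i in range(len(s)) if s.startswith(punc, i)]
--     cuts = []
--     last = 0
--     for i in occ:
--         if i >= last + offset:
--             cuts.append(i + 1)
--             last = i + 1
--     parts = [s[a:b] for a, b in zip([0] + cuts, cuts)]
--     if last < len(s):
--         parts.append(s[last:])
--     return parts
--
--
-- def split_sent_by_punc(sent, punc_list, max_len):
--     # Iterative worklist over punctuation levels instead of recursion;
--     # each over-long piece is cut via precomputed occurrence positions.
--     pieces = [sent]
--     for punc in punc_list: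
--         pieces = [c for p in pieces
--                   for c in ([p] if len(p) <= max_len else _chunks(p, punc))]
--     return pieces
-- ===== Notes on version B (the rewrite author's own statement) =====
-- stated objective: alternative
-- what changed: Replaced A's recursion over punc_list and its sequential find-and-cut while loop by an iterative worklist over punctuation levels whose splitter first enumerates all occurrence positions of the punctuation, greedily selects cut boundaries from them, and then slices the string at those boundaries (fixed-width slices for the empty punctuation).
import Mathlib
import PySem

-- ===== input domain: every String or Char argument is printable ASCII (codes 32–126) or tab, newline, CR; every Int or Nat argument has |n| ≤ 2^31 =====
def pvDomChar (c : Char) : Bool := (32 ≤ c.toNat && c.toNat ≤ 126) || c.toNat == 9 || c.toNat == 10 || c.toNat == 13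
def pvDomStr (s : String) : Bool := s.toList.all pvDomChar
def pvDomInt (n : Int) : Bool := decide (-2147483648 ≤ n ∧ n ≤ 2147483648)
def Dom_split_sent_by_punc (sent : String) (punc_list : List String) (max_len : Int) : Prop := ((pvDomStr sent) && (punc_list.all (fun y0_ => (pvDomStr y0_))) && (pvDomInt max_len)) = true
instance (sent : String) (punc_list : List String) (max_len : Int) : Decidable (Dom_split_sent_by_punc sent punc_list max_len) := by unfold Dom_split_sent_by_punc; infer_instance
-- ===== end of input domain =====

-- B replaces A's recursion over punc_list and its sequential find/cut loop by an
-- iterative worklist plus a precomputed-occurrence/greedy-cut splitter (objective: simpler).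

-- ===== PORT A =====
-- A's inner while loop: accumulate chunks of `s`, cutting after each occurrence of
-- `punc` found at or past start+offset (pos = start+offset itself when punc = "").
-- fuel = s.length + 1 bounds the iterations: start strictly increases each round.
def pvLoopA (s punc : List Char) (offset : Int) : Nat → Int → List (List Char)
  | 0, _ => []
  | fuel + 1, start =>
    if start < (s.length : Int) then
      let pos : Int := if punc ≠ [] then PySem.Chars.findFrom s punc (start + offset) none
                       else start + offset
      if pos ≠ -1 then
        PySem.Chars.slice s (some start) (some (pos + 1)) :: pvLoopA s punc offset fuel (pos + 1)
      else
        [PySem.Chars.slice s (some start) none]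
    else []

def pvSplitA (s : List Char) (punc_list : List String) (max_len : Int) : List (List Char) :=
  match punc_list with
  | [] => [s]
  | punc :: rest =>
    if (s.length : Int) ≤ max_len then [s]
    else
      let pc := punc.toList
      let offset : Int := if pc = [' '] ∨ pc = [] then 100 else 5
      let sent_list := pvLoopA s pc offset (s.length + 1) 0
      sent_list.flatMap (fun t => pvSplitA t rest max_len)

def split_sent_by_punc (sent : String) (punc_list : List String) (max_len : Int) : List String :=
  (pvSplitA sent.toList punc_list max_len).map String.ofList

-- ===== PORT B =====
-- all occurrence positions of punc in s ([i for i in range(len(s)) if s.startswith(punc, i)];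
-- s.startswith(punc, i) with 0 ≤ i is exactly punc.isPrefixOf (s.drop i))
def pvOcc (s punc : List Char) : List Nat :=
  (List.range s.length).filter (fun i => punc.isPrefixOf (s.drop i))

-- the greedy pass over occ: keep an occurrence iff it is at least `offset` past the last cut
def pvCuts (offset : Nat) : List Nat → Nat → List Nat
  | [], _ => []
  | i :: rest, last =>
    if last + offset ≤ i then (i + 1) :: pvCuts offset rest (i + 1)
    else pvCuts offset rest last

-- _chunks from Source B; Python slices s[a:b] with 0 ≤ a ≤ b are drop/take
def pvChunksB (s punc : List Char) : List (List Char) :=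
  if punc = [] then
    (PySem.List.pyRange 0 s.length 101).map (fun i => (s.drop i.toNat).take 101)
  else
    let offset : Nat := if punc = [' '] then 100 else 5
    let cuts := pvCuts offset (pvOcc s punc) 0
    let parts := ((0 :: cuts).zip cuts).map (fun ab => (s.drop ab.1).take (ab.2 - ab.1))
    let last := cuts.getLastD 0       -- the Python variable `last` equals the last cut (0 if none)
    if last < s.length then parts ++ [s.drop last] else parts

def split_sent_by_punc_alt (sent : String) (punc_list : List String) (max_len : Int) : List String :=
  (punc_list.foldl
    (fun pieces punc =>
      pieces.flatMap (fun p => if (p.length : Int) ≤ max_len then [p] else pvChunksB p punc.toList))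
    [sent.toList]).map String.ofList

-- ===== PRECONDITION & SPEC =====
def Spec_split_sent_by_punc (sent : String) (punc_list : List String) (max_len : Int) (out : List String) : Prop := out = split_sent_by_punc_alt sent punc_list max_len
instance (sent : String) (punc_list : List String) (max_len : Int) (out : List String) : Decidable (Spec_split_sent_by_punc sent punc_list max_len out) := by unfold Spec_split_sent_by_punc; infer_instance

-- ===== CLAIM (what is proved, stated in full; the proofs are below) =====
def Claim_equal_split_sent_by_punc : Prop := ∀ (sent : String) (punc_list : List String) (max_len : Int), Dom_split_sent_by_punc sent punc_list max_len → Spec_split_sent_by_punc sent punc_list max_len (split_sent_by_punc sent punc_list max_len)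

-- ===== LEMMAS AND PROOFS =====

-- chunks of s determined by a list of cut boundaries starting at a
def pvChunksOf (s : List Char) : Nat → List Nat → List (List Char)
  | a, [] => if a < s.length then [s.drop a] else []
  | a, c :: rest => (s.drop a).take (c - a) :: pvChunksOf s c rest

theorem pvZip_eq_chunksOf (s : List Char) :
    ∀ (cuts : List Nat) (a : Nat),
      (((a :: cuts).zip cuts).map (fun ab => (s.drop ab.1).take (ab.2 - ab.1)) ++
        (if cuts.getLastD a < s.length then [s.drop (cuts.getLastD a)] else []))
      = pvChunksOf s a cuts := by
  intro cuts
  induction cuts with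
  | nil => intro a; simp [pvChunksOf]
  | cons c rest ih =>
      intro a
      simp only [List.zip_cons_cons, List.map_cons, List.getLastD_cons, List.cons_append]
      rw [ih c]
      rfl

theorem mem_pvOcc (s punc : List Char) (i : Nat) :
    i ∈ pvOcc s punc ↔ i < s.length ∧ punc <+: s.drop i := by
  simp [pvOcc, List.mem_filter, List.mem_range, List.isPrefixOf_iff_prefix]

theorem findFrom_gt_len (s sub : List Char) (k : Nat) (h : s.length < k) :
    PySem.Chars.findFrom s sub (k : Int) none = -1 := by
  simp only [PySem.Chars.findFrom]
  have h1 : ¬ ((k : Int) < 0) := by omega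
  have h2 : ((s.length : Int)) < (k : Int) := by exact_mod_cast h
  simp [h1, h2]

-- on any list, find? of (k ≤ ·) returns an element ≥ k
theorem find?_ge_some (k : Nat) {l : List Nat} {c : Nat}
    (h : l.find? (fun i => decide (k ≤ i)) = some c) : c ∈ l ∧ k ≤ c := by
  refine ⟨List.mem_of_find?_eq_some h, ?_⟩
  have := List.find?_some h
  simpa using this

theorem find?_ge_none (k : Nat) {l : List Nat} :
    l.find? (fun i => decide (k ≤ i)) = none ↔ ∀ i ∈ l, i < k := by
  simp [List.find?_eq_none]

-- identify B's find? over the occurrence list with A's findFrom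
theorem occ_find?_eq (s punc : List Char) (hp : punc ≠ []) (k : Nat) :
    (pvOcc s punc).find? (fun i => decide (k ≤ i)) =
      (if PySem.Chars.findFrom s punc (k : Int) none = -1 then none
       else some (PySem.Chars.findFrom s punc (k : Int) none).toNat) := by
  by_cases hk : k ≤ s.length
  · by_cases hf : PySem.Chars.findFrom s punc (k : Int) none = -1
    · rw [if_pos hf]
      rw [find?_ge_none]
      intro i hi
      by_contra hik
      push_neg at hik
      have hmem := (mem_pvOcc s punc i).1 hi
      have hinf : punc <:+: s.drop k := by
        have : punc <+: (s.drop k).drop (i - k) := by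
          rw [List.drop_drop, show k + (i - k) = i by omega]
          exact hmem.2
        exact (PySem.Chars.isIn_iff_infix punc (s.drop k)).1
          ((PySem.Chars.exists_prefix_drop_iff_isIn punc (s.drop k)).1 ⟨i - k, this⟩)
      exact ((PySem.Chars.findFrom_natCast_eq_neg_one_iff s punc k hk).1 hf) hinf
    · rw [if_neg hf]
      obtain ⟨h1, h2, h3⟩ := PySem.Chars.findFrom_natCast_spec s punc k hk hf
      set pos := PySem.Chars.findFrom s punc (k : Int) none with hpos
      -- find? returns the first element satisfying the predicate; show it is pos.toNat
      have hlen : pos.toNat < s.length := by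
        have hne : s.drop pos.toNat ≠ [] := by
          intro hnil; rw [hnil] at h2; exact hp (List.prefix_nil.1 h2)
        have := List.drop_eq_nil_iff.not.1 (by simpa using hne)
        omega
      have hmem : pos.toNat ∈ pvOcc s punc := (mem_pvOcc s punc _).2 ⟨hlen, h2⟩
      have hkpos : k ≤ pos.toNat := by omega
      -- induct over the occurrence list
      have hocc : ∀ i ∈ pvOcc s punc, k ≤ i → pos.toNat ≤ i := by
        intro i hi hki
        by_contra hlt
        push_neg at hlt
        exact h3 i hki hlt ((mem_pvOcc s punc i).1 hi).2
      have hsorted : (pvOcc s punc).Pairwise (· < ·) :=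
        List.Pairwise.filter _ List.pairwise_lt_range
      -- generic: on a <-sorted list, the first elem ≥ k is the least one
      clear h2 h3
      revert hmem hocc hsorted
      generalize pvOcc s punc = l
      induction l with
      | nil => intro h _ _; exact absurd h (List.not_mem_nil)
      | cons x xs ih =>
          intro hmem hocc hsorted
          by_cases hx : k ≤ x
          · have : pos.toNat ≤ x := hocc x (List.mem_cons_self) hx
            have hxle : ∀ y ∈ x :: xs, x ≤ y := by
              intro y hy
              rcases List.mem_cons.1 hy with rfl | hy'
              · exact le_refl _
              · exact le_of_lt ((List.pairwise_cons.1 hsorted).1 y hy')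
            have : pos.toNat = x := le_antisymm this (by
              rcases List.mem_cons.1 hmem with h' | h'
              · omega
              · exact le_trans (hxle _ (List.mem_cons_of_mem _ h')) (le_refl _) |>.trans (by
                  have := hxle pos.toNat hmem; omega))
            simp [List.find?_cons, hx, this]
          · have hmem' : pos.toNat ∈ xs := by
              rcases List.mem_cons.1 hmem with h' | h'
              · omega
              · exact h'
            have := ih hmem' (fun i hi hki => hocc i (List.mem_cons_of_mem _ hi) hki)
              (List.Pairwise.sublist (List.sublist_cons_self x xs) hsorted)
            simp [List.find?_cons, hx, this]
  · push_neg at hk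
    rw [if_pos (findFrom_gt_len s punc k hk)]
    rw [find?_ge_none]
    intro i hi
    have := (mem_pvOcc s punc i).1 hi
    omega

-- one step of the greedy cut selection, phrased through find?
theorem pvCuts_eq_step (o : Nat) :
    ∀ (occ : List Nat) (last : Nat),
      pvCuts o occ last =
        (match occ.find? (fun i => decide (last + o ≤ i)) with
         | none => []
         | some c => (c + 1) :: pvCuts o occ (c + 1)) := by
  intro occ
  induction occ with
  | nil => intro last; rfl
  | cons i rest ih =>
      intro last
      by_cases h : last + o ≤ i
      · rw [List.find?_cons_of_pos (by simpa using h)]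
        show (if last + o ≤ i then (i + 1) :: pvCuts o rest (i + 1) else pvCuts o rest last)
          = (i + 1) :: pvCuts o (i :: rest) (i + 1)
        rw [if_pos h]
        congr 1
        show pvCuts o rest (i + 1)
          = (if i + 1 + o ≤ i then (i + 1) :: pvCuts o rest (i + 1) else pvCuts o rest (i + 1))
        rw [if_neg (by omega)]
      · rw [List.find?_cons_of_neg (by simpa using h)]
        show (if last + o ≤ i then (i + 1) :: pvCuts o rest (i + 1) else pvCuts o rest last)
          = (match rest.find? (fun j => decide (last + o ≤ j)) with
             | none => []
             | some c => (c + 1) :: pvCuts o (i :: rest) (c + 1))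
        rw [if_neg h, ih last]
        cases hfind : rest.find? (fun j => decide (last + o ≤ j)) with
        | none => rfl
        | some c =>
            have hc : last + o ≤ c := (find?_ge_some _ hfind).2
            show (c + 1) :: pvCuts o rest (c + 1) = (c + 1) :: pvCuts o (i :: rest) (c + 1)
            congr 1
            show pvCuts o rest (c + 1)
              = (if c + 1 + o ≤ i then (i + 1) :: pvCuts o rest (i + 1) else pvCuts o rest (c + 1))
            rw [if_neg (by omega)]

-- A's loop unfolds one round at a time
theorem pvLoopA_succ (s punc : List Char) (offset : Int) (fuel : Nat) (start : Int) :
    pvLoopA s punc offset (fuel + 1) start =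
      if start < (s.length : Int) then
        let pos : Int := if punc ≠ [] then PySem.Chars.findFrom s punc (start + offset) none
                         else start + offset
        if pos ≠ -1 then
          PySem.Chars.slice s (some start) (some (pos + 1)) :: pvLoopA s punc offset fuel (pos + 1)
        else
          [PySem.Chars.slice s (some start) none]
      else [] := rfl

theorem pvLoopA_succ_ne (s punc : List Char) (hp : punc ≠ []) (offset : Int) (fuel : Nat) (start : Int) :
    pvLoopA s punc offset (fuel + 1) start =
      if start < (s.length : Int) then
        if PySem.Chars.findFrom s punc (start + offset) none ≠ -1 then
          PySem.Chars.slice s (some start)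
              (some (PySem.Chars.findFrom s punc (start + offset) none + 1)) ::
            pvLoopA s punc offset fuel (PySem.Chars.findFrom s punc (start + offset) none + 1)
        else
          [PySem.Chars.slice s (some start) none]
      else [] := by
  rw [pvLoopA_succ]
  simp only [if_pos hp]

theorem pvLoopA_succ_nil (s : List Char) (offset : Int) (fuel : Nat) (start : Int) :
    pvLoopA s [] offset (fuel + 1) start =
      if start < (s.length : Int) then
        if start + offset ≠ -1 then
          PySem.Chars.slice s (some start) (some (start + offset + 1)) ::
            pvLoopA s [] offset fuel (start + offset + 1)
        else
          [PySem.Chars.slice s (some start) none]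
      else [] := by
  rw [pvLoopA_succ]
  simp only [ne_eq, not_true_eq_false, if_false]

-- A's loop for a nonempty punc equals chunks-of-greedy-cuts
theorem loopA_eq_chunksOf (s punc : List Char) (hp : punc ≠ []) (o : Nat) :
    ∀ (fuel : Nat) (start : Nat), s.length ≤ fuel + start →
      pvLoopA s punc (o : Int) fuel (start : Int)
        = pvChunksOf s start (pvCuts o (pvOcc s punc) start) := by
  intro fuel
  induction fuel with
  | zero =>
      intro start hle
      rw [pvCuts_eq_step]
      have hnone : (pvOcc s punc).find? (fun i => decide (start + o ≤ i)) = none := by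
        rw [find?_ge_none]
        intro i hi
        have := (mem_pvOcc s punc i).1 hi
        omega
      rw [hnone]
      simp [pvLoopA, pvChunksOf, show ¬ (start < s.length) by omega]
  | succ f ih =>
      intro start hle
      rw [pvLoopA_succ_ne s punc hp,
        show ((start : Nat) : Int) + ((o : Nat) : Int) = ((start + o : Nat) : Int) by push_cast; ring,
        pvCuts_eq_step]
      by_cases hlt : start < s.length
      · rw [if_pos (by exact_mod_cast hlt : ((start : Nat) : Int) < (s.length : Int)),
          occ_find?_eq s punc hp (start + o)]
        by_cases hf : PySem.Chars.findFrom s punc ((start + o : Nat) : Int) none = -1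
        · rw [if_pos hf, if_neg (by rw [hf]; simp)]
          show [PySem.Chars.slice s (some ((start : Nat) : Int)) none] = pvChunksOf s start []
          rw [show PySem.Chars.slice s (some ((start : Nat) : Int)) none
                = s.drop start from PySem.List.slice_from_natCast s start]
          show _ = if start < s.length then [s.drop start] else []
          rw [if_pos hlt]
        · rw [if_neg hf]
          set pos := PySem.Chars.findFrom s punc ((start + o : Nat) : Int) none with hposdef
          have hknn : (0 : Int) ≤ ((start + o : Nat) : Int) := by positivity
          have hge : ((start + o : Nat) : Int) ≤ pos :=
            (PySem.Chars.findFrom_natCast_spec s punc (start + o)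
              (by by_contra hgt
                  push_neg at hgt
                  exact hf (findFrom_gt_len s punc _ hgt)) hf).1
          have hposnn : 0 ≤ pos := le_trans hknn hge
          rw [if_pos (by omega : pos ≠ -1)]
          have hsl : PySem.Chars.slice s (some ((start : Nat) : Int)) (some (pos + 1))
              = (s.drop start).take (pos.toNat + 1 - start) := by
            rw [show pos + 1 = ((pos.toNat + 1 : Nat) : Int) by omega]
            exact PySem.List.slice_natCast s start (pos.toNat + 1)
          rw [hsl]
          have hrec : pvLoopA s punc (o : Int) f (pos + 1)
              = pvChunksOf s (pos.toNat + 1) (pvCuts o (pvOcc s punc) (pos.toNat + 1)) := by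
            rw [show pos + 1 = ((pos.toNat + 1 : Nat) : Int) by omega]
            exact ih (pos.toNat + 1) (by omega)
          rw [hrec]
          rfl
      · rw [if_neg (by exact_mod_cast hlt : ¬ ((start : Nat) : Int) < (s.length : Int))]
        have hnone : (pvOcc s punc).find? (fun i => decide (start + o ≤ i)) = none := by
          rw [find?_ge_none]
          intro i hi
          have := (mem_pvOcc s punc i).1 hi
          omega
        rw [hnone]
        simp [pvChunksOf, hlt]

-- pyRange with positive literal step unfolds one element at a time
theorem pyRange_cons_101 {a b : Int} (h : a < b) :
    PySem.List.pyRange a b 101 = a :: PySem.List.pyRange (a + 101) b 101 := by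
  rw [PySem.List.pyRange_of_pos a b (by norm_num), PySem.List.pyRange_of_pos (a + 101) b (by norm_num)]
  have hm : (if a < b then ((b - a + 101 - 1) / 101).toNat else 0)
      = (if a + 101 < b then ((b - (a + 101) + 101 - 1) / 101).toNat else 0) + 1 := by
    rw [if_pos h]
    by_cases h2 : a + 101 < b
    · rw [if_pos h2]; omega
    · rw [if_neg h2]; omega
  rw [hm, List.range_succ_eq_map, List.map_cons, List.map_map]
  congr 1
  · ring
  · apply List.map_congr_left
    intro k _
    simp [Function.comp]
    ring

-- A's loop for the empty punc equals the fixed-width comprehension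
theorem loopA_empty_eq (s : List Char) :
    ∀ (fuel : Nat) (start : Nat), s.length ≤ 101 * fuel + start →
      pvLoopA s [] (100 : Int) fuel (start : Int)
        = (PySem.List.pyRange (start : Int) (s.length : Int) 101).map
            (fun i => (s.drop i.toNat).take 101) := by
  intro fuel
  induction fuel with
  | zero =>
      intro start hle
      have hr : PySem.List.pyRange (start : Int) (s.length : Int) 101 = [] := by
        rw [PySem.List.pyRange_of_pos _ _ (by norm_num : (0:Int) < 101),
          if_neg (by exact_mod_cast (by omega : ¬ start < s.length))]
        rfl
      simp [pvLoopA, hr]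
  | succ f ih =>
      intro start hle
      rw [pvLoopA_succ_nil]
      by_cases hlt : start < s.length
      · have hlt' : (start : Int) < (s.length : Int) := by exact_mod_cast hlt
        rw [if_pos hlt', pyRange_cons_101 hlt', List.map_cons]
        rw [if_pos (by omega : ((start : Int) + 100) ≠ -1)]
        have hsl : PySem.Chars.slice s (some ((start : Nat) : Int)) (some ((start : Int) + 100 + 1))
            = (s.drop start).take 101 := by
          rw [show (start : Int) + 100 + 1 = ((start + 101 : Nat) : Int) by push_cast; ring]
          rw [show PySem.Chars.slice s (some ((start : Nat) : Int)) (some ((start + 101 : Nat) : Int))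
                = (s.drop start).take (start + 101 - start) from PySem.List.slice_natCast s start (start + 101)]
          congr 1
          omega
        rw [hsl]
        have hrec : pvLoopA s [] (100 : Int) f ((start : Int) + 100 + 1)
            = (PySem.List.pyRange ((start + 101 : Nat) : Int) (s.length : Int) 101).map
                (fun i => (s.drop i.toNat).take 101) := by
          rw [show (start : Int) + 100 + 1 = ((start + 101 : Nat) : Int) by push_cast; ring]
          exact ih (start + 101) (by omega)
        rw [hrec]
        simp only [Int.toNat_natCast]
        rw [show ((start + 101 : Nat) : Int) = ((start : Int) + 101) by push_cast; ring]
      · have hr : PySem.List.pyRange (start : Int) (s.length : Int) 101 = [] := by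
          rw [PySem.List.pyRange_of_pos _ _ (by norm_num : (0:Int) < 101),
            if_neg (by exact_mod_cast hlt)]
          rfl
        rw [if_neg (by exact_mod_cast hlt), hr]
        rfl

-- pvChunksB computes exactly what A's inner loop computes
theorem chunksB_eq_loopA (s : List Char) (pc : List Char) :
    pvChunksB s pc
      = pvLoopA s pc (if pc = [' '] ∨ pc = [] then 100 else 5) (s.length + 1) 0 := by
  by_cases h0 : pc = []
  · subst h0
    rw [pvChunksB, if_pos rfl, if_pos (Or.inr rfl)]
    rw [show (0 : Int) = ((0 : Nat) : Int) from rfl,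
      loopA_empty_eq s (s.length + 1) 0 (by omega)]
  · have hmain : ∀ o : Nat,
        ((((0 :: pvCuts o (pvOcc s pc) 0).zip (pvCuts o (pvOcc s pc) 0)).map
            (fun ab => (s.drop ab.1).take (ab.2 - ab.1))) ++
          (if (pvCuts o (pvOcc s pc) 0).getLastD 0 < s.length
           then [s.drop ((pvCuts o (pvOcc s pc) 0).getLastD 0)] else []))
        = pvLoopA s pc (o : Int) (s.length + 1) ((0 : Nat) : Int) := by
      intro o
      rw [loopA_eq_chunksOf s pc h0 o (s.length + 1) 0 (by omega)]
      exact pvZip_eq_chunksOf s (pvCuts o (pvOcc s pc) 0) 0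
    by_cases hsp : pc = [' ']
    · rw [pvChunksB, if_neg h0]
      simp only [if_pos hsp, if_pos (Or.inl hsp)]
      rw [show (100 : Int) = ((100 : Nat) : Int) by norm_num, show (0 : Int) = ((0 : Nat) : Int) from rfl]
      rw [← hmain 100, List.getLastD_eq_getLast?]
      by_cases hc : (pvCuts 100 (pvOcc s pc) 0).getLast?.getD 0 < s.length
      · rw [if_pos hc, if_pos hc]
      · rw [if_neg hc, if_neg hc, List.append_nil]
    · rw [pvChunksB, if_neg h0]
      simp only [if_neg hsp, if_neg (by simp [h0, hsp] : ¬ (pc = [' '] ∨ pc = []))]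
      rw [show (5 : Int) = ((5 : Nat) : Int) by norm_num, show (0 : Int) = ((0 : Nat) : Int) from rfl]
      rw [← hmain 5, List.getLastD_eq_getLast?]
      by_cases hc : (pvCuts 5 (pvOcc s pc) 0).getLast?.getD 0 < s.length
      · rw [if_pos hc, if_pos hc]
      · rw [if_neg hc, if_neg hc, List.append_nil]

-- one level of B's worklist
def pvStep (max_len : Int) (pieces : List (List Char)) (punc : String) : List (List Char) :=
  pieces.flatMap (fun p => if (p.length : Int) ≤ max_len then [p] else pvChunksB p punc.toList)

theorem pvFoldl_flatMap (m : Int) (l : List String) :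
    ∀ (pieces : List (List Char)),
      l.foldl (pvStep m) pieces = pieces.flatMap (fun p => l.foldl (pvStep m) [p]) := by
  induction l with
  | nil => intro pieces; simp
  | cons punc rest ih =>
      intro pieces
      simp only [List.foldl_cons]
      rw [ih (pvStep m pieces punc)]
      have h2 : pieces.flatMap (fun p => List.foldl (pvStep m) (pvStep m [p] punc) rest)
              = pieces.flatMap (fun p => (pvStep m [p] punc).flatMap (fun q => List.foldl (pvStep m) [q] rest)) :=
        List.flatMap_congr (fun p _ => ih _)
      rw [h2]
      simp [pvStep, List.flatMap_assoc]

theorem pvFoldl_short (m : Int) (s : List Char) (h : (s.length : Int) ≤ m) :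
    ∀ (l : List String), l.foldl (pvStep m) [s] = [s] := by
  intro l
  induction l with
  | nil => rfl
  | cons punc rest ih =>
      simp only [List.foldl_cons]
      have : pvStep m [s] punc = [s] := by simp [pvStep, h]
      rw [this, ih]

theorem pvSplitA_eq_foldl (m : Int) :
    ∀ (pl : List String) (s : List Char),
      pvSplitA s pl m = pl.foldl (pvStep m) [s] := by
  intro pl
  induction pl with
  | nil => intro s; rfl
  | cons punc rest ih =>
      intro s
      by_cases h : (s.length : Int) ≤ m
      · simp only [pvSplitA, h, if_true]
        rw [pvFoldl_short m s h]
      · simp only [pvSplitA, h, if_false]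
        simp only [List.foldl_cons]
        have hstep : pvStep m [s] punc = pvChunksB s punc.toList := by simp [pvStep, h]
        rw [hstep]
        rw [pvFoldl_flatMap m rest, chunksB_eq_loopA s punc.toList]
        exact List.flatMap_congr (fun t _ => ih t)

-- ===== VERDICT (by name: the statement is the Claim_ definition above) =====
theorem split_sent_by_punc_spec : Claim_equal_split_sent_by_punc := by
  intro sent punc_list max_len _
  unfold Spec_split_sent_by_punc split_sent_by_punc split_sent_by_punc_alt
  rw [pvSplitA_eq_foldl]
  rfl
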